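-- pv_equiv track=rewrite | github.com/Jef808/ellm | scripts/parse_conversations_dir.py | split_subtrees
-- ===== SOURCE A (Python) =====
-- def split_subtrees(org_content_lines: list[str]) -> list[str]:
--     """Parse a conversations file into an array of conversation strings."""
--     trees = []
--     current_tree = []
--     is_in_tree = False
--
--     for line in org_content_lines:
--         if line.startswith("* "):
--             if is_in_tree:
--                 trees.append(''.join(current_tree))
--                 current_tree = []
--
--             current_tree.append(line)
--             is_in_tree = True
--
--         elif is_in_tree and not line.startswith("* "):
--             current_tree.append(line)
--
--     if current_tree:
--         trees.append(''.join(current_tree))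
--
--     return trees
-- ===== SOURCE B (Python) =====
-- def split_subtrees(org_content_lines: list[str]) -> list[str]:
--     """Parse a conversations file into an array of conversation strings."""
--     def span_non_header(lines):
--         """Longest prefix of lines that are not headers, and the rest."""
--         for k, line in enumerate(lines):
--             if line.startswith("* "):
--                 return lines[:k], lines[k:]
--         return lines, []
--
--     _, rest = span_non_header(org_content_lines)
--     trees = []
--     while rest:
--         head, tail = rest[0], rest[1:]
--         body, rest = span_non_header(tail)
--         trees.append(''.join([head] + body))
--     return trees
-- ===== Notes on version B (the rewrite author's own statement) =====
-- stated objective: alternative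
-- what changed: Replaced A's single fold carrying (trees, current_tree, is_in_tree) state with a span-based decomposition: skip the pre-header prefix, then repeatedly split off head plus its longest run of non-header lines and join each chunk.
import Mathlib
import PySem

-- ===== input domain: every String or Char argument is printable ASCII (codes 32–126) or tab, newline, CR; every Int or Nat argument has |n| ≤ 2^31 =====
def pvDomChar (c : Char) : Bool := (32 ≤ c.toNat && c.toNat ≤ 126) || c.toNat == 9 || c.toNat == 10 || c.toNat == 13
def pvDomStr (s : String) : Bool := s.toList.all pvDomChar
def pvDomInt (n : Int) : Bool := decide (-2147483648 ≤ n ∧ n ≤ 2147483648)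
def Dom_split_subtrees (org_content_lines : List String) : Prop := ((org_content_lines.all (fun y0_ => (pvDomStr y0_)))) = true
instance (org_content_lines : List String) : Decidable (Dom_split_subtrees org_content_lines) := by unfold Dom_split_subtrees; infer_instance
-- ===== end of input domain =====

-- B replaces A's stateful fold by a span-based chunking decomposition (alternative structure, same cost).

-- ===== PORT A =====
-- loop body of A: state is (trees, current_tree, is_in_tree)
def stepA (st : List String × List String × Bool) (line : String) : List String × List String × Bool :=
  let (trees, current_tree, is_in_tree) := st
  if PySem.Str.startswith line "* " then
    ((if is_in_tree then trees ++ [PySem.Str.join "" current_tree] else trees), [line], true)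
  else if is_in_tree && !(PySem.Str.startswith line "* ") then
    (trees, current_tree ++ [line], is_in_tree)
  else st

-- A's trailing "if current_tree: trees.append(''.join(current_tree))"
def finishA (st : List String × List String × Bool) : List String :=
  if st.2.1 = [] then st.1 else st.1 ++ [PySem.Str.join "" st.2.1]

def split_subtrees (org_content_lines : List String) : List String :=
  finishA (org_content_lines.foldl stepA ([], [], false))

-- ===== PORT B =====
-- Source B's span_non_header: longest prefix of non-header lines, and the rest
def spanNonHeader : List String → List String × List String
  | [] => ([], [])
  | l :: ls =>
    if PySem.Str.startswith l "* " then ([], l :: ls)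
    else ((spanNonHeader ls).1.cons l, (spanNonHeader ls).2)

theorem spanNonHeader_snd_length_le : ∀ ls : List String, (spanNonHeader ls).2.length ≤ ls.length := by
  intro ls
  induction ls with
  | nil => simp [spanNonHeader]
  | cons l ls ih =>
    simp only [spanNonHeader]
    split
    · simp
    · simpa using Nat.le_succ_of_le ih

-- Source B's while loop over `rest` (head, then its non-header body, join, recurse)
def goB : List String → List String
  | [] => []
  | head :: tail =>
    PySem.Str.join "" (head :: (spanNonHeader tail).1) :: goB (spanNonHeader tail).2
  termination_by l => l.length
  decreasing_by
    exact Nat.lt_succ_of_le (spanNonHeader_snd_length_le tail)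

def split_subtrees_alt (org_content_lines : List String) : List String :=
  goB (spanNonHeader org_content_lines).2

-- ===== PRECONDITION & SPEC =====
def Spec_split_subtrees (org_content_lines : List String) (out : List String) : Prop := out = split_subtrees_alt org_content_lines
instance (org_content_lines : List String) (out : List String) : Decidable (Spec_split_subtrees org_content_lines out) := by unfold Spec_split_subtrees; infer_instance

-- ===== CLAIM (what is proved, stated in full; the proofs are below) =====
def Claim_equal_split_subtrees : Prop := ∀ (org_content_lines : List String), Dom_split_subtrees org_content_lines → Spec_split_subtrees org_content_lines (split_subtrees org_content_lines)

-- ===== LEMMAS AND PROOFS =====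

-- Invariant for A's fold once inside a tree: the pending current_tree absorbs the
-- non-header span, and the rest of the fold produces exactly B's remaining chunks.
theorem foldA_in_tree (lines : List String) : ∀ (trees cur : List String), cur ≠ [] →
    finishA (lines.foldl stepA (trees, cur, true)) =
      trees ++ PySem.Str.join "" (cur ++ (spanNonHeader lines).1) :: goB (spanNonHeader lines).2 := by
  induction lines with
  | nil =>
    intro trees cur hcur
    rw [show spanNonHeader ([] : List String) = ([], []) from rfl, goB]
    simp [finishA, hcur]
  | cons line ls ih =>
    intro trees cur hcur
    by_cases h : PySem.Chars.startswith line.toList ['*', ' '] = true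
    · have hs : stepA (trees, cur, true) line = (trees ++ [PySem.Str.join "" cur], [line], true) := by
        simp [stepA, h]
      rw [List.foldl_cons, hs, ih _ _ (by simp)]
      rw [show spanNonHeader (line :: ls) = ([], line :: ls) by simp [spanNonHeader, h], goB]
      simp
    · have hs : stepA (trees, cur, true) line = (trees, cur ++ [line], true) := by
        simp [stepA, h]
      rw [List.foldl_cons, hs, ih _ _ (by simp)]
      have : spanNonHeader (line :: ls) = (line :: (spanNonHeader ls).1, (spanNonHeader ls).2) := by
        simp [spanNonHeader, h]
      rw [this]
      simp [List.append_assoc]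

-- Before the first header A's fold is a no-op, so the whole run is B's chunking of
-- the suffix starting at the first header.
theorem foldA_not_in_tree (lines : List String) :
    finishA (lines.foldl stepA ([], [], false)) = goB (spanNonHeader lines).2 := by
  induction lines with
  | nil =>
    rw [show spanNonHeader ([] : List String) = ([], []) from rfl, goB]
    simp [finishA]
  | cons line ls ih =>
    by_cases h : PySem.Chars.startswith line.toList ['*', ' '] = true
    · have hs : stepA ([], [], false) line = ([], [line], true) := by simp [stepA, h]
      rw [List.foldl_cons, hs, foldA_in_tree ls _ _ (by simp)]
      rw [show spanNonHeader (line :: ls) = ([], line :: ls) by simp [spanNonHeader, h], goB]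
      simp
    · have hs : stepA ([], [], false) line = ([], [], false) := by simp [stepA, h]
      rw [List.foldl_cons, hs, ih]
      have : spanNonHeader (line :: ls) = (line :: (spanNonHeader ls).1, (spanNonHeader ls).2) := by
        simp [spanNonHeader, h]
      rw [this]

-- ===== VERDICT (by name: the statement is the Claim_ definition above) =====
theorem split_subtrees_spec : Claim_equal_split_subtrees := by
  intro lines _
  unfold Spec_split_subtrees split_subtrees split_subtrees_alt
  exact foldA_not_in_tree lines
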